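-- pv_equiv track=rewrite | github.com/lawlessminimalist/coding_practice | problems/problem_solving/mock-interview.py | encodeTheLogFile
-- ===== SOURCE A (Python) =====
-- def encodeTheLogFile(logFile):
--     encoded_string = []
--     seen = {}
--     length = len(logFile)
--     for index in range(length):
--         count=0
--         previous_cal = seen.get(logFile[index])
--         if previous_cal is not None:
--             encoded_string.append(str(previous_cal-1))
--             encoded_string.append(logFile[index])
--             seen.update({logFile[index]:previous_cal-1})
--         else:
--             for sub_index in range(index,length):
--                 if logFile[index] == logFile[sub_index]:
--                     count+=1
--             encoded_string.append(str(count))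
--             encoded_string.append(logFile[index])
--             seen.update({logFile[index]:count})
--
--     return ''.join(encoded_string)
-- ===== SOURCE B (Python) =====
-- def encodeTheLogFile(logFile):
--     counts = {}
--     pieces = []
--     for ch in reversed(logFile):
--         n = counts.get(ch, 0) + 1
--         counts[ch] = n
--         pieces.append(str(n) + ch)
--     return ''.join(reversed(pieces))
-- ===== Notes on version B (the rewrite author's own statement) =====
-- stated objective: faster
-- what changed: Replaced A's per-first-occurrence inner suffix scan plus seen-dict bookkeeping with a single right-to-left pass that maintains a running count per character and joins the collected pieces in reverse.
import Mathlib
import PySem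

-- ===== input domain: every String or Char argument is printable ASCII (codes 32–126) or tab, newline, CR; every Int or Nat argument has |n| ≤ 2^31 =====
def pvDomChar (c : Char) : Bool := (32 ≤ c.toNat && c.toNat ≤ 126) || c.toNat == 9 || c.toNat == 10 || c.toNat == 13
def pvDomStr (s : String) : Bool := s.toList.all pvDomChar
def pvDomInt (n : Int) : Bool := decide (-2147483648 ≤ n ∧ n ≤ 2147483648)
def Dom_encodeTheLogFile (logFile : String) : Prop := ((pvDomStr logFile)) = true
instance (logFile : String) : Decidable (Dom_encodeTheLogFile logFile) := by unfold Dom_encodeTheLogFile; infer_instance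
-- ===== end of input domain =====

-- B replaces A's per-first-occurrence inner suffix scan and seen-dict arithmetic by one
-- right-to-left pass keeping a running per-character count (asymptotically faster).

-- ===== PORT A =====
-- the for-index loop of A, as structural recursion on the remaining suffix
-- (logFile[index] is the head; range(index, length) iterates over that same suffix)
def pvALoop : List Char → List String → PySem.Dict Char Int → List String
  | [], encoded_string, _ => encoded_string
  | c :: rest, encoded_string, seen =>
    match seen.get? c with
    | some previous_cal =>
        pvALoop rest
          (encoded_string ++ [PySem.Int.toStr (previous_cal - 1), String.ofList [c]])
          (seen.insert c (previous_cal - 1))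
    | none =>
        -- inner loop: for sub_index in range(index, length): if logFile[index] == logFile[sub_index]: count += 1
        let count : Int := (c :: rest).foldl (fun count x => if x == c then count + 1 else count) 0
        pvALoop rest
          (encoded_string ++ [PySem.Int.toStr count, String.ofList [c]])
          (seen.insert c count)

def encodeTheLogFile (logFile : String) : String :=
  PySem.Str.join "" (pvALoop logFile.toList [] PySem.Dict.empty)

-- ===== PORT B =====
-- B: one right-to-left pass with a running counts dict, pieces collected then reversed
def pvBLoop : List Char → List String → PySem.Dict Char Int → List String × PySem.Dict Char Int
  | [], pieces, counts => (pieces, counts)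
  | c :: rest, pieces, counts =>
    let n : Int := counts.getD c 0 + 1
    pvBLoop rest (pieces ++ [PySem.Int.toStr n ++ String.ofList [c]]) (counts.insert c n)

def encodeTheLogFile_alt (logFile : String) : String :=
  PySem.Str.join "" ((pvBLoop logFile.toList.reverse [] PySem.Dict.empty).1.reverse)

-- ===== PRECONDITION & SPEC =====
def Spec_encodeTheLogFile (logFile : String) (out : String) : Prop := out = encodeTheLogFile_alt logFile
instance (logFile : String) (out : String) : Decidable (Spec_encodeTheLogFile logFile out) := by unfold Spec_encodeTheLogFile; infer_instance

-- ===== CLAIM (what is proved, stated in full; the proofs are below) =====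
def Claim_equal_encodeTheLogFile : Prop := ∀ (logFile : String), Dom_encodeTheLogFile logFile → Spec_encodeTheLogFile logFile (encodeTheLogFile logFile)

-- ===== LEMMAS AND PROOFS =====

-- the pieces both loops produce: at each position, str(count of c in the suffix from here) then c
def specA : List Char → List String
  | [] => []
  | c :: rest => PySem.Int.toStr (1 + (rest.count c : Int)) :: String.ofList [c] :: specA rest

def specB : List Char → List String
  | [] => []
  | c :: rest => (PySem.Int.toStr (1 + (rest.count c : Int)) ++ String.ofList [c]) :: specB rest

theorem pvALoop_eq (l : List Char) : ∀ (enc : List String) (seen : PySem.Dict Char Int),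
    (∀ d v, seen.get? d = some v → v = 1 + (l.count d : Int)) →
    pvALoop l enc seen = enc ++ specA l := by
  induction l with
  | nil => intro enc seen _; simp [pvALoop, specA]
  | cons c rest ih =>
    intro enc seen hinv
    have hinsert : ∀ d v, ((seen.insert c (1 + (rest.count c : Int))).get? d = some v →
        v = 1 + (rest.count d : Int)) := by
      intro d v hv
      rw [PySem.Dict.get?_insert] at hv
      by_cases hdc : d = c
      · subst hdc; simp at hv; omega
      · simp [hdc] at hv
        have h2 := hinv d v hv
        have hcd : ¬ c = d := fun h => hdc h.symm
        simp [hcd] at h2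
        omega
    have hcount : (List.foldl (fun count x => if x == c then count + 1 else count) 0 (c :: rest))
        = 1 + (rest.count c : Int) := by
      rw [PySem.List.foldl_beq_add_one]
      rw [List.count_cons_self]
      push_cast; omega
    cases hg : seen.get? c with
    | some previous_cal =>
      have hp : previous_cal = 1 + ((c :: rest).count c : Int) := hinv c previous_cal hg
      simp [List.count_cons_self] at hp
      have hval : previous_cal - 1 = 1 + (rest.count c : Int) := by omega
      simp only [pvALoop, hg]
      rw [hval, ih _ _ hinsert]
      simp [specA]
    | none =>
      simp only [pvALoop, hg]
      rw [hcount, ih _ _ hinsert]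
      simp [specA]

-- what B's loop produces: piece j of l counts occurrences among pfx and the part of l before j, plus one
def specBrev : List Char → List Char → List String
  | [], _ => []
  | c :: rest, pfx => (PySem.Int.toStr ((pfx.count c : Int) + 1) ++ String.ofList [c]) :: specBrev rest (c :: pfx)

theorem pvBLoop_eq (l : List Char) : ∀ (pieces : List String) (counts : PySem.Dict Char Int) (pfx : List Char),
    (∀ d, counts.getD d 0 = (pfx.count d : Int)) →
    (pvBLoop l pieces counts).1 = pieces ++ specBrev l pfx := by
  induction l with
  | nil => intro pieces counts pfx _; simp [pvBLoop, specBrev]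
  | cons c rest ih =>
    intro pieces counts pfx hinv
    rw [pvBLoop]
    have hnext : ∀ d, (counts.insert c (counts.getD c 0 + 1)).getD d 0 = ((c :: pfx).count d : Int) := by
      intro d
      rw [PySem.Dict.getD_insert]
      by_cases hdc : d = c
      · subst hdc; simp [hinv d, List.count_cons_self]
      · have hcd : ¬ c = d := fun h => hdc h.symm
        simp [hdc, hinv d, hcd]
    rw [ih _ _ _ hnext]
    simp [specBrev, hinv c]

theorem specBrev_append (xs : List Char) (c : Char) : ∀ (pfx : List Char),
    specBrev (xs ++ [c]) pfx
      = specBrev xs pfx ++ [PySem.Int.toStr (((xs ++ pfx).count c : Int) + 1) ++ String.ofList [c]] := by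
  induction xs with
  | nil => intro pfx; simp [specBrev]
  | cons x rest ih =>
    intro pfx
    simp only [List.cons_append, specBrev]
    rw [ih (x :: pfx)]
    have : (rest ++ x :: pfx).count c = (x :: rest ++ pfx).count c := by
      have : (rest ++ x :: pfx).Perm ((x :: rest) ++ pfx) := by
        exact List.perm_append_comm_assoc rest [x] pfx
      exact this.count_eq c
    rw [this]
    simp

theorem specBrev_reverse (l : List Char) : (specBrev l.reverse []).reverse = specB l := by
  induction l with
  | nil => simp [specBrev, specB]
  | cons c rest ih =>
    rw [List.reverse_cons, specBrev_append, List.reverse_append]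
    simp only [List.reverse_singleton, List.singleton_append]
    rw [ih]
    simp [specB, List.count_reverse]
    ring_nf

theorem join_nil_eq_flatten (L : List String) :
    PySem.Chars.join [] (L.map String.toList) = (L.map String.toList).flatten := by
  induction L with
  | nil => simp [PySem.Chars.join_nil]
  | cons p rest ih =>
    cases rest with
    | nil => simp [PySem.Chars.join_singleton]
    | cons q r =>
      simp only [List.map_cons] at ih ⊢
      rw [PySem.Chars.join_cons_cons]
      simp only [List.flatten_cons] at ih ⊢
      rw [← ih]; simp

theorem flatten_specA_eq_specB (l : List Char) :
    ((specA l).map String.toList).flatten = ((specB l).map String.toList).flatten := by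
  induction l with
  | nil => simp [specA, specB]
  | cons c rest ih =>
    simp only [specA, specB, List.map_cons, List.flatten_cons, String.toList_append]
    rw [ih]; simp

-- ===== VERDICT (by name: the statement is the Claim_ definition above) =====
theorem encodeTheLogFile_spec : Claim_equal_encodeTheLogFile := by
  intro logFile _
  unfold Spec_encodeTheLogFile encodeTheLogFile encodeTheLogFile_alt
  rw [pvALoop_eq _ _ _ (by intro d v h; simp [PySem.Dict.get?_empty] at h)]
  rw [pvBLoop_eq _ _ _ [] (by intro d; simp [PySem.Dict.getD_empty])]
  rw [List.nil_append, List.nil_append, specBrev_reverse]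
  apply String.toList_inj.mp
  rw [PySem.Str.toList_join, PySem.Str.toList_join]
  simp only [String.toList_empty]
  rw [join_nil_eq_flatten, join_nil_eq_flatten, flatten_specA_eq_specB]
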